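-- pv_equiv track=rewrite | github.com/sstrang15/song_analytics_backend | modules/import_tidal.py | build_buckets
-- ===== SOURCE A (Python) =====
-- def build_buckets(tracks):
--     buckets = {
--         "tracks": [],
--         "albums": {},
--         "eps": {},
--         "artists": {}
--     }
--
--     for item in tracks:
--         track = item.get("track", {})
--         album = item.get("album", {})
--         artist = item.get("artist", {})
--
--         # -------- TRACKS --------
--         buckets["tracks"].append(track)
--
--         # -------- ALBUMS / EPS --------
--         album_id = album.get("id")
--         album_type = album.get("type")  # <-- comes from Tidal ("ALBUM", "EP", etc)
--
--         if album_id and album_id not in buckets["albums"] and album_id not in buckets["eps"]: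
--
--             if album_type == "EP":
--                 buckets["eps"][album_id] = album
--             else:
--                 buckets["albums"][album_id] = album
--
--         # -------- ARTISTS --------
--         artist_id = artist.get("id")
--         if artist_id and artist_id not in buckets["artists"]:
--             buckets["artists"][artist_id] = artist
--
--     # convert dicts → lists
--     buckets["albums"] = list(buckets["albums"].values())
--     buckets["eps"] = list(buckets["eps"].values())
--     buckets["artists"] = list(buckets["artists"].values())
--
--     return buckets
-- ===== SOURCE B (Python) =====
-- def build_buckets(tracks):
--     # Staged, index-based pipeline: project each field list, dedup by the
--     # position of the first occurrence of each truthy id, then partition.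
--     track_list = [item.get("track", {}) for item in tracks]
--     albums_raw = [item.get("album", {}) for item in tracks]
--     artists_raw = [item.get("artist", {}) for item in tracks]
--
--     def firsts(objs):
--         ids = [o.get("id") for o in objs]
--         return [o for i, o in enumerate(objs)
--                 if o.get("id") and ids.index(o.get("id")) == i]
--
--     uniq_albums = firsts(albums_raw)
--     return {
--         "tracks": track_list,
--         "albums": [a for a in uniq_albums if a.get("type") != "EP"],
--         "eps": [a for a in uniq_albums if a.get("type") == "EP"],
--         "artists": firsts(artists_raw),
--     }
-- ===== Notes on version B (the rewrite author's own statement) =====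
-- stated objective: alternative
-- what changed: B replaces A's single stateful pass with mutating dicts by a staged dict-free pipeline: project the three field lists, deduplicate albums/artists by testing whether each element's position is the first occurrence of its id (ids.index(id) == i), then partition the unique albums by type with two comprehensions.
import Mathlib
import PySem

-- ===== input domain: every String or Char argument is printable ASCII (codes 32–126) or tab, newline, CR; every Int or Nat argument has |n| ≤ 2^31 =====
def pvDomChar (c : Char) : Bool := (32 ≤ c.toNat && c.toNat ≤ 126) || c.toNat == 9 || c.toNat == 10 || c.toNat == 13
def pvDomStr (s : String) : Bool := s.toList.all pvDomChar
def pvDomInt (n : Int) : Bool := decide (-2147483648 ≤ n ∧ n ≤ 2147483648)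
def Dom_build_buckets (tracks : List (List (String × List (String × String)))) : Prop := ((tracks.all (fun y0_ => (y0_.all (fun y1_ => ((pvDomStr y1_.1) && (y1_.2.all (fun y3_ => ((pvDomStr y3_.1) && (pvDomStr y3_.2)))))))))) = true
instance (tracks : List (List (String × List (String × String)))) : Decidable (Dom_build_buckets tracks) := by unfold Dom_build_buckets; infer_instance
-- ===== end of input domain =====

-- B is a dict-free staged pipeline (project field lists, dedup by first-occurrence index, partition
-- by type) instead of A's single pass mutating three dicts; objective: alternative (same results).

-- dict.get(k) on an association list: first match (shared lookup primitive of both ports)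
def pyLook {α : Type} (d : List (String × α)) (k : String) : Option α :=
  (d.find? (fun p => p.1 == k)).map (·.2)

-- ===== PORT A =====
def buildStepA
    (st : List (List (String × String)) × PySem.Dict String (List (String × String)) × PySem.Dict String (List (String × String)) × PySem.Dict String (List (String × String)))
    (item : List (String × List (String × String))) :
    List (List (String × String)) × PySem.Dict String (List (String × String)) × PySem.Dict String (List (String × String)) × PySem.Dict String (List (String × String)) :=
  let track := (pyLook item "track").getD []
  let album := (pyLook item "album").getD []
  let artist := (pyLook item "artist").getD []
  let trs := st.1 ++ [track]
  let albums := st.2.1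
  let eps := st.2.2.1
  let artists := st.2.2.2
  let album_id := pyLook album "id"
  let album_type := pyLook album "type"
  let ae :=
    match album_id with
    | some aid =>
      if aid != "" && !(albums.contains aid) && !(eps.contains aid) then
        if album_type == some "EP" then (albums, eps.insert aid album)
        else (albums.insert aid album, eps)
      else (albums, eps)
    | none => (albums, eps)
  let artists' :=
    match pyLook artist "id" with
    | some pid => if pid != "" && !(artists.contains pid) then artists.insert pid artist else artists
    | none => artists
  (trs, ae.1, ae.2, artists')

def build_buckets (tracks : List (List (String × List (String × String)))) : List (String × List (List (String × String))) :=
  let st := tracks.foldl buildStepA ([], PySem.Dict.empty, PySem.Dict.empty, PySem.Dict.empty)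
  [("tracks", st.1), ("albums", st.2.1.values), ("eps", st.2.2.1.values), ("artists", st.2.2.2.values)]

-- ===== PORT B =====
-- firsts(objs): keep o at position i iff o.get("id") is truthy and i is the first index of that id
def pvFirsts (objs : List (List (String × String))) : List (List (String × String)) :=
  let ids := objs.map (fun o => pyLook o "id")
  ((PySem.List.enumerate objs).filter (fun p =>
      match pyLook p.2 "id" with
      | some s => s != "" && ((PySem.List.index? ids (some s)).map (fun k => (k : Int)) == some p.1)
      | none => false)).map (·.2)

def build_buckets_alt (tracks : List (List (String × List (String × String)))) : List (String × List (List (String × String))) :=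
  let track_list := tracks.map (fun item => (pyLook item "track").getD [])
  let albums_raw := tracks.map (fun item => (pyLook item "album").getD [])
  let artists_raw := tracks.map (fun item => (pyLook item "artist").getD [])
  let uniq := pvFirsts albums_raw
  [("tracks", track_list),
   ("albums", uniq.filter (fun a => pyLook a "type" != some "EP")),
   ("eps", uniq.filter (fun a => pyLook a "type" == some "EP")),
   ("artists", pvFirsts artists_raw)]

-- ===== PRECONDITION & SPEC =====
def Spec_build_buckets (tracks : List (List (String × List (String × String)))) (out : List (String × List (List (String × String)))) : Prop := out = build_buckets_alt tracks
instance (tracks : List (List (String × List (String × String)))) (out : List (String × List (List (String × String)))) : Decidable (Spec_build_buckets tracks out) := by unfold Spec_build_buckets; infer_instance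

-- ===== CLAIM (what is proved, stated in full; the proofs are below) =====
def Claim_equal_build_buckets : Prop := ∀ (tracks : List (List (String × List (String × String)))), Dom_build_buckets tracks → Spec_build_buckets tracks (build_buckets tracks)

-- ===== LEMMAS AND PROOFS =====

def pvIsEP (a : List (String × String)) : Bool := pyLook a "type" == some "EP"

-- the generic first-wins dict fold that A performs for artists (and, split by type, for albums)
def pvSeenStep (d : PySem.Dict String (List (String × String))) (o : List (String × String)) :
    PySem.Dict String (List (String × String)) :=
  match pyLook o "id" with
  | some s => if s != "" && !d.contains s then d.insert s o else d
  | none => d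

-- one step of A on the filtered pair of dicts is one first-wins step followed by filtering
theorem pv_any_filter_or {α : Type} (l : List (String × α)) (q : α → Bool) (k : String) :
    ((l.filter (fun p => q p.2)).any (fun p => p.1 == k)
      || (l.filter (fun p => !q p.2)).any (fun p => p.1 == k))
    = l.any (fun p => p.1 == k) := by
  induction l with
  | nil => simp
  | cons h t ih =>
    by_cases hq : q h.2 = true <;>
      simp [hq, ← ih, Bool.or_assoc, Bool.or_left_comm]

theorem pv_filter_map_snd {α : Type} (l : List (String × α)) (q : α → Bool) :
    (l.map (fun x => x.2)).filter q = (l.filter (fun p => q p.2)).map (fun x => x.2) := by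
  induction l with
  | nil => simp
  | cons h t ih => by_cases hq : q h.2 = true <;> simp [hq, ih]

theorem pv_step (item : List (String × List (String × String)))
    (trs : List (List (String × String)))
    (artists seen : PySem.Dict String (List (String × String))) :
    buildStepA (trs, ⟨seen.items.filter (fun p => !pvIsEP p.2)⟩,
                ⟨seen.items.filter (fun p => pvIsEP p.2)⟩, artists) item
    = (trs ++ [(pyLook item "track").getD []],
       ⟨(pvSeenStep seen ((pyLook item "album").getD [])).items.filter (fun p => !pvIsEP p.2)⟩,
       ⟨(pvSeenStep seen ((pyLook item "album").getD [])).items.filter (fun p => pvIsEP p.2)⟩,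
       pvSeenStep artists ((pyLook item "artist").getD [])) := by
  have hsplit : ∀ aid : String,
      ((seen.items.filter (fun p => pvIsEP p.2)).any (fun p => p.1 == aid)
        || (seen.items.filter (fun p => !pvIsEP p.2)).any (fun p => p.1 == aid))
      = seen.items.any (fun p => p.1 == aid) := fun aid => pv_any_filter_or seen.items pvIsEP aid
  simp only [buildStepA, pvSeenStep]
  cases hid : pyLook ((pyLook item "album").getD []) "id" with
  | none => rfl
  | some aid =>
    by_cases hc : seen.contains aid = true
    · have h1 : ((seen.items.filter (fun p => pvIsEP p.2)).any (fun p => p.1 == aid)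
          || (seen.items.filter (fun p => !pvIsEP p.2)).any (fun p => p.1 == aid)) = true := by
        rw [hsplit]; exact hc
      have hq : (seen.items.filter (fun p => pvIsEP p.2)).any (fun p => p.1 == aid) = true
          ∨ (seen.items.filter (fun p => !pvIsEP p.2)).any (fun p => p.1 == aid) = true := by
        rcases Bool.or_eq_true_iff.mp h1 with h | h
        · exact Or.inl h
        · exact Or.inr h
      simp only [PySem.Dict.contains_mk]
      rcases hq with h | h <;> simp [h, hc]
    · have hcf : seen.items.any (fun p => p.1 == aid) = false := by
        rw [PySem.Dict.contains] at hc
        exact Bool.eq_false_iff.mpr hc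
      obtain ⟨hEPf, hALf⟩ := Bool.or_eq_false_iff.mp ((hsplit aid).trans hcf)
      have hcsf : seen.contains aid = false := hcf
      have hcaf : (PySem.Dict.mk (seen.items.filter (fun p => !pvIsEP p.2))).contains aid = false := by
        rw [PySem.Dict.contains_mk]; exact hALf
      have hcef : (PySem.Dict.mk (seen.items.filter (fun p => pvIsEP p.2))).contains aid = false := by
        rw [PySem.Dict.contains_mk]; exact hEPf
      have hitems : (seen.insert aid ((pyLook item "album").getD [])).items
          = seen.items ++ [(aid, (pyLook item "album").getD [])] :=
        PySem.Dict.items_insert_of_not_contains _ _ hcsf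
      simp only [hcaf, hcef, hcsf, Bool.not_false, Bool.and_true]
      by_cases hne : (aid != "") = true
      · simp only [hne, if_pos]
        by_cases hEP : (pyLook ((pyLook item "album").getD []) "type" == some "EP") = true
        · have hEPp : pvIsEP ((pyLook item "album").getD []) = true := hEP
          simp only [hEP, if_pos]
          simp only [Prod.mk.injEq]
          refine ⟨trivial, ?_, ?_, trivial⟩
          · apply PySem.Dict.ext
            simp [hitems, List.filter_append, hEPp]
          · apply PySem.Dict.ext
            simp [PySem.Dict.items_insert_of_not_contains _ _ hcef, hitems,
                  List.filter_append, hEPp]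
        · have hEP' : (pyLook ((pyLook item "album").getD []) "type" == some "EP") = false :=
            Bool.eq_false_iff.mpr hEP
          have hEPp : pvIsEP ((pyLook item "album").getD []) = false := hEP'
          simp only [hEP', Bool.false_eq_true, if_false]
          simp only [Prod.mk.injEq]
          refine ⟨trivial, ?_, ?_, trivial⟩
          · apply PySem.Dict.ext
            simp [PySem.Dict.items_insert_of_not_contains _ _ hcaf, hitems,
                  List.filter_append, hEPp]
          · apply PySem.Dict.ext
            simp [hitems, List.filter_append, hEPp]
      · have hne' : (aid != "") = false := Bool.eq_false_iff.mpr hne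
        simp [hne']

-- the loop invariant: A's fold splits into three independent component folds
theorem pv_inv (tracks : List (List (String × List (String × String))))
    (trs : List (List (String × String)))
    (artists seen : PySem.Dict String (List (String × String))) :
    tracks.foldl buildStepA (trs, ⟨seen.items.filter (fun p => !pvIsEP p.2)⟩,
        ⟨seen.items.filter (fun p => pvIsEP p.2)⟩, artists)
    = (trs ++ tracks.map (fun item => (pyLook item "track").getD []),
       ⟨((tracks.map (fun item => (pyLook item "album").getD [])).foldl pvSeenStep seen).items.filter (fun p => !pvIsEP p.2)⟩,
       ⟨((tracks.map (fun item => (pyLook item "album").getD [])).foldl pvSeenStep seen).items.filter (fun p => pvIsEP p.2)⟩,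
       (tracks.map (fun item => (pyLook item "artist").getD [])).foldl pvSeenStep artists) := by
  induction tracks generalizing trs artists seen with
  | nil => simp
  | cons item rest ih =>
    simp only [List.foldl_cons, List.map_cons]
    rw [pv_step]
    rw [ih]
    simp

-- dedup of the first-wins fold, as a structural recursion producing the kept (id, obj) pairs
def pvDedup (d : PySem.Dict String (List (String × String))) :
    List (List (String × String)) → List (String × List (String × String))
  | [] => []
  | o :: rest =>
    match pyLook o "id" with
    | some s =>
      if s != "" && !d.contains s then (s, o) :: pvDedup (d.insert s o) rest
      else pvDedup d rest
    | none => pvDedup d rest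

theorem pv_fold_items (objs : List (List (String × String)))
    (d : PySem.Dict String (List (String × String))) :
    (objs.foldl pvSeenStep d).items = d.items ++ pvDedup d objs := by
  induction objs generalizing d with
  | nil => simp [pvDedup]
  | cons o rest ih =>
    simp only [List.foldl_cons, pvDedup, pvSeenStep]
    cases hid : pyLook o "id" with
    | none => exact ih d
    | some s =>
      by_cases hk : (s != "" && !d.contains s) = true
      · have hnc : d.contains s = false := by
          rcases Bool.and_eq_true_iff.mp hk with ⟨_, h2⟩
          simpa using h2
        simp only [hk, if_pos]
        rw [ih, PySem.Dict.items_insert_of_not_contains _ _ hnc]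
        simp
      · have hk' : (s != "" && !d.contains s) = false := Bool.eq_false_iff.mpr hk
        simp only [hk', Bool.false_eq_true, if_false]
        exact ih d

-- the kept objects of the first-wins dedup are exactly B's first-occurrence-index filter
def pvCond (d : PySem.Dict String (List (String × String))) (ids : List (Option String))
    (s : Int) (p : Int × List (String × String)) : Bool :=
  match pyLook p.2 "id" with
  | some str => str != "" && !d.contains str
      && ((PySem.List.index? ids (some str)).map (fun k => (k : Int)) == some (p.1 - s))
  | none => false

theorem pv_cond_shift (d d' : PySem.Dict String (List (String × String)))
    (idO : Option String) (ids' : List (Option String)) (s : Int)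
    (hd' : ∀ x : String, x ≠ "" → d'.contains x = ((idO == some x) || d.contains x))
    (p : Int × List (String × String)) (hp : s + 1 ≤ p.1) :
    pvCond d (idO :: ids') s p = pvCond d' ids' (s + 1) p := by
  unfold pvCond
  cases hpid : pyLook p.2 "id" with
  | none => rfl
  | some x =>
    dsimp only
    by_cases hx : x = ""
    · simp [hx]
    · rw [hd' x hx]
      by_cases hEq : idO = some x
      · subst hEq
        rw [PySem.List.index?_cons_self]
        have hne0 : ((0 : Int) == p.1 - s) = false :=
          beq_eq_false_iff_ne.mpr (by omega)
        simp [hne0]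
      · have hEqb : (idO == some x) = false := beq_eq_false_iff_ne.mpr hEq
        rw [PySem.List.index?_cons_of_ne _ hEq, hEqb]
        cases hix : PySem.List.index? ids' (some x) with
        | none => simp
        | some k =>
          have hsh : (((k : Int) + 1 == p.1 - s)) = ((k : Int) == p.1 - (s + 1)) := by
            apply Bool.eq_iff_iff.mpr
            simp only [beq_iff_eq]
            omega
          simp [hsh]

theorem pv_dedup_enum (objs : List (List (String × String)))
    (d : PySem.Dict String (List (String × String))) (s : Int) :
    (pvDedup d objs).map (·.2)
    = ((PySem.List.enumerate objs s).filter
        (pvCond d (objs.map (fun o => pyLook o "id")) s)).map (·.2) := by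
  induction objs generalizing d s with
  | nil => simp [pvDedup, PySem.List.enumerate_nil]
  | cons o rest ih =>
    have hmem : ∀ p ∈ PySem.List.enumerate rest (s + 1), s + 1 ≤ p.1 := by
      intro p hp
      rcases (PySem.List.mem_enumerate_iff rest (s + 1) p).mp hp with ⟨k, hk, rfl⟩
      omega
    rw [PySem.List.enumerate_cons, List.map_cons, List.filter_cons]
    cases hid : pyLook o "id" with
    | none =>
      have hhead : pvCond d (none :: rest.map (fun o => pyLook o "id")) s (s, o) = false := by
        unfold pvCond; simp [hid]
      simp only [pvDedup, hid, hhead, Bool.false_eq_true, if_false]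
      rw [List.filter_congr (fun p hp =>
        pv_cond_shift d d none (rest.map (fun o => pyLook o "id")) s
          (fun x hx => by simp) p (hmem p hp))]
      exact ih d (s + 1)
    | some str =>
      have hhead : pvCond d (some str :: rest.map (fun o => pyLook o "id")) s (s, o)
          = (str != "" && !d.contains str) := by
        unfold pvCond
        dsimp only
        rw [hid]
        dsimp only
        rw [PySem.List.index?_cons_self]
        simp
      by_cases hk : (str != "" && !d.contains str) = true
      · simp only [pvDedup, hid, hk, if_pos, hhead, List.map_cons]
        rw [List.filter_congr (fun p hp =>
          pv_cond_shift d (d.insert str o) (some str) (rest.map (fun o => pyLook o "id")) s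
            (fun x hx => by
              rw [PySem.Dict.contains_insert]
              by_cases hxs : x = str
              · subst hxs; simp
              · have h1 : (x == str) = false := beq_eq_false_iff_ne.mpr hxs
                have h2 : ((some str : Option String) == some x) = false :=
                  beq_eq_false_iff_ne.mpr (fun h => hxs (Option.some.inj h).symm)
                rw [h1, h2]) p (hmem p hp))]
        rw [ih (d.insert str o) (s + 1)]
      · have hk' : (str != "" && !d.contains str) = false := Bool.eq_false_iff.mpr hk
        simp only [pvDedup, hid, hk', Bool.false_eq_true, if_false, hhead]
        rw [List.filter_congr (fun p hp =>
          pv_cond_shift d d (some str) (rest.map (fun o => pyLook o "id")) s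
            (fun x hx => by
              by_cases hxs : x = str
              · have hcx : d.contains x = true := by
                  rcases Bool.and_eq_false_iff.mp hk' with h1 | h1
                  · exact absurd (by subst hxs; simpa using h1) hx
                  · subst hxs; simpa using h1
                simp [hcx]
              · have h2 : ((some str : Option String) == some x) = false :=
                  beq_eq_false_iff_ne.mpr (fun h => hxs (Option.some.inj h).symm)
                rw [h2]; simp) p (hmem p hp))]
        exact ih d (s + 1)

theorem pv_firsts_eq (objs : List (List (String × String))) :
    (pvDedup ⟨[]⟩ objs).map (·.2) = pvFirsts objs := by
  rw [pv_dedup_enum objs ⟨[]⟩ 0]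
  unfold pvFirsts
  congr 1
  apply List.filter_congr
  intro p hp
  unfold pvCond
  cases hpid : pyLook p.2 "id" with
  | none => rfl
  | some str => simp [PySem.Dict.contains_mk]

theorem pv_part_al (objs : List (List (String × String))) :
    ((pvDedup ⟨[]⟩ objs).filter (fun p => !pvIsEP p.2)).map (fun x => x.2)
    = (pvFirsts objs).filter (fun a => pyLook a "type" != some "EP") := by
  rw [← pv_firsts_eq, pv_filter_map_snd]
  simp [pvIsEP, bne]

theorem pv_part_ep (objs : List (List (String × String))) :
    ((pvDedup ⟨[]⟩ objs).filter (fun p => pvIsEP p.2)).map (fun x => x.2)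
    = (pvFirsts objs).filter (fun a => pyLook a "type" == some "EP") := by
  rw [← pv_firsts_eq, pv_filter_map_snd]
  simp [pvIsEP]

-- ===== VERDICT (by name: the statement is the Claim_ definition above) =====
theorem build_buckets_spec : Claim_equal_build_buckets := by
  intro tracks _
  unfold Spec_build_buckets build_buckets build_buckets_alt
  have hinv := pv_inv tracks [] PySem.Dict.empty PySem.Dict.empty
  simp only [PySem.Dict.empty, List.filter_nil] at hinv
  simp only [PySem.Dict.empty]
  rw [hinv]
  simp only [PySem.Dict.values, pv_fold_items]
  simp only [List.nil_append]
  rw [pv_part_al, pv_part_ep, pv_firsts_eq]
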